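-- pv_equiv track=rewrite | github.com/xBetex/controle_de_estoque | views/inventory_view.py | filter_products_by_status
-- ===== SOURCE A (Python) =====
-- def filter_products_by_status(products, status):
--     """Filtrar produtos por status"""
--     filtered = []
--     for product in products:
--         quantity = product.get('quantity', 0)
--         min_stock = product.get('min_stock', 0)
--
--         if status == "Sem Estoque" and quantity == 0:
--             filtered.append(product)
--         elif status == "Estoque Baixo" and 0 < quantity <= min_stock:
--             filtered.append(product)
--         elif status == "Normal" and quantity > min_stock:
--             filtered.append(product)
--
--     return filtered
-- ===== SOURCE B (Python) =====
-- def _stock_status(product):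
--     """Classify a product into its stock category (None = unclassifiable)."""
--     quantity = product.get('quantity', 0)
--     min_stock = product.get('min_stock', 0)
--     if quantity == 0:
--         return "Sem Estoque"
--     if 0 < quantity <= min_stock:
--         return "Estoque Baixo"
--     if quantity > min_stock:
--         return "Normal"
--     return None
--
--
-- def filter_products_by_status(products, status):
--     """Filtrar produtos por status"""
--     buckets = {}
--     for product in products:
--         category = _stock_status(product)
--         if category is not None:
--             buckets.setdefault(category, []).append(product)
--     return buckets.get(status, [])
-- ===== Notes on version B (the rewrite author's own statement) =====
-- stated objective: alternative
-- what changed: B classifies each product once into a single stock category, groups products into per-category buckets in a dict, and returns the bucket for the requested status, instead of A's per-product chain of (status, condition) tests with an accumulator list.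
-- intended difference: When status is "Normal" and some product has quantity 0 with negative min_stock, A includes that product (it also lists it under "Sem Estoque"), while B classifies it only as "Sem Estoque" and excludes it; a product with zero stock is not in normal stock, so B's value is the intended one. — e.g. on filter_products_by_status([[("quantity", 0), ("min_stock", -1)]], "Normal"): A returns [[("quantity", 0), ("min_stock", -1)]], B returns []
import Mathlib
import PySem

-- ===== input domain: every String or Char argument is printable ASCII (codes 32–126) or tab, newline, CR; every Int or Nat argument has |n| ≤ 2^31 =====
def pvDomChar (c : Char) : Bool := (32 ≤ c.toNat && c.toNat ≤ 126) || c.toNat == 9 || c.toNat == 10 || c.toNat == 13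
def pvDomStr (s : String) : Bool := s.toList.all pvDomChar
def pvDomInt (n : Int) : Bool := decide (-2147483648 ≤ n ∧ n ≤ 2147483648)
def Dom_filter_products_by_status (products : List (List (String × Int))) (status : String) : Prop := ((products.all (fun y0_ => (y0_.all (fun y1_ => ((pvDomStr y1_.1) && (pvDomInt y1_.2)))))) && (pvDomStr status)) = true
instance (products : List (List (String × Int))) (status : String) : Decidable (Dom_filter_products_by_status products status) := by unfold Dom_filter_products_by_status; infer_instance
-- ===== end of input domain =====

-- B groups products into per-category buckets (classify once, then dict lookup) instead of A's per-product (status, condition) chain; objective: alternative decomposition.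

-- ===== PORT A =====
-- product.get(k, 0): first-match lookup in the association list, default 0
def pvGetA (product : List (String × Int)) (k : String) : Int :=
  match product.find? (fun kv => kv.1 == k) with
  | some kv => kv.2
  | none => 0

def filter_products_by_status (products : List (List (String × Int))) (status : String) : List (List (String × Int)) :=
  products.foldl (fun filtered product =>
    let quantity := pvGetA product "quantity"
    let min_stock := pvGetA product "min_stock"
    if status == "Sem Estoque" && quantity == 0 then filtered ++ [product]
    else if status == "Estoque Baixo" && (decide (0 < quantity) && decide (quantity ≤ min_stock)) then filtered ++ [product]
    else if status == "Normal" && decide (min_stock < quantity) then filtered ++ [product]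
    else filtered) []

-- ===== PORT B =====
-- product.get(k, 0), written as structural recursion on the association list
def pvGetB (product : List (String × Int)) (k : String) : Int :=
  match product with
  | [] => 0
  | (k', v) :: rest => if k' == k then v else pvGetB rest k

-- _stock_status: classify one product into its stock category (none = unclassifiable)
def pvStockStatus (product : List (String × Int)) : Option String :=
  let quantity := pvGetB product "quantity"
  let min_stock := pvGetB product "min_stock"
  if quantity == 0 then some "Sem Estoque"
  else if decide (0 < quantity) && decide (quantity ≤ min_stock) then some "Estoque Baixo"
  else if decide (min_stock < quantity) then some "Normal"
  else none

-- buckets.setdefault(category, []).append(product) = Dict.modify category [] (· ++ [product])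
def filter_products_by_status_alt (products : List (List (String × Int))) (status : String) : List (List (String × Int)) :=
  let buckets := products.foldl (fun b product =>
    match pvStockStatus product with
    | some category => b.modify category [] (· ++ [product])
    | none => b) PySem.Dict.empty
  buckets.getD status []

-- ===== PRECONDITION & SPEC =====
-- auxiliary first-match lookup for D_ (independent of both ports)
def pvLookup0 (product : List (String × Int)) (k : String) : Int :=
  ((product.find? (fun kv => kv.1 == k)).map Prod.snd).getD 0

-- When status is "Normal" and some product has quantity 0 with negative min_stock, A includes that product (it also lists it under "Sem Estoque"), while B classifies it only as "Sem Estoque" and excludes it; a zero-stock product is not in normal stock, so B's value is the intended one.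
def D_filter_products_by_status (products : List (List (String × Int))) (status : String) : Prop :=
  status = "Normal" ∧ ∃ p ∈ products, pvLookup0 p "quantity" = 0 ∧ pvLookup0 p "min_stock" ≤ -1
instance (products : List (List (String × Int))) (status : String) : Decidable (D_filter_products_by_status products status) := by unfold D_filter_products_by_status; infer_instance

def Spec_filter_products_by_status (products : List (List (String × Int))) (status : String) (out : List (List (String × Int))) : Prop := ¬ D_filter_products_by_status products status → out = filter_products_by_status_alt products status
instance (products : List (List (String × Int))) (status : String) (out : List (List (String × Int))) : Decidable (Spec_filter_products_by_status products status out) := by unfold Spec_filter_products_by_status; infer_instance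

def pvDiffWitness_filter_products_by_status : (List (List (String × Int))) × String :=
  ([[("quantity", 0), ("min_stock", -1)]], "Normal")
def pvDiffWitnessOut_filter_products_by_status : (List (List (String × Int))) × (List (List (String × Int))) :=
  ([[("quantity", 0), ("min_stock", -1)]], [])

-- ===== CLAIM (what is proved, stated in full; the proofs are below) =====
def Claim_unchanged_filter_products_by_status : Prop := ∀ (products : List (List (String × Int))) (status : String), Dom_filter_products_by_status products status → Spec_filter_products_by_status products status (filter_products_by_status products status)
def Claim_changed_filter_products_by_status : Prop := Dom_filter_products_by_status (pvDiffWitness_filter_products_by_status.1) (pvDiffWitness_filter_products_by_status.2) ∧ D_filter_products_by_status (pvDiffWitness_filter_products_by_status.1) (pvDiffWitness_filter_products_by_status.2) ∧ filter_products_by_status (pvDiffWitness_filter_products_by_status.1) (pvDiffWitness_filter_products_by_status.2) = pvDiffWitnessOut_filter_products_by_status.1 ∧ filter_products_by_status_alt (pvDiffWitness_filter_products_by_status.1) (pvDiffWitness_filter_products_by_status.2) = pvDiffWitnessOut_filter_products_by_status.2 ∧ pvDiffWitnessOut_filter_products_by_status.1 ≠ pvDiffWitnessOut_filter_products_by_s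tatus.2
def Claim_exact_filter_products_by_status : Prop := ∀ (products : List (List (String × Int))) (status : String), Dom_filter_products_by_status products status → D_filter_products_by_status products status → filter_products_by_status products status ≠ filter_products_by_status_alt products status

-- ===== LEMMAS AND PROOFS =====

theorem pvGetB_eq_pvGetA (product : List (String × Int)) (k : String) :
    pvGetB product k = pvGetA product k := by
  induction product with
  | nil => rfl
  | cons kv rest ih =>
    obtain ⟨k', v⟩ := kv
    simp only [pvGetB, pvGetA, List.find?]
    by_cases h : (k' == k) = true
    · simp [h]
    · simp only [Bool.not_eq_true] at h
      simp [h, ih, pvGetA]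

theorem pvLookup0_eq_pvGetA (product : List (String × Int)) (k : String) :
    pvLookup0 product k = pvGetA product k := by
  unfold pvLookup0 pvGetA
  cases product.find? (fun kv => kv.1 == k) <;> rfl

-- A's predicate, as a Bool
def predA (status : String) (p : List (String × Int)) : Bool :=
  (status == "Sem Estoque" && pvGetA p "quantity" == 0)
  || (status == "Estoque Baixo" && (decide (0 < pvGetA p "quantity") && decide (pvGetA p "quantity" ≤ pvGetA p "min_stock")))
  || (status == "Normal" && decide (pvGetA p "min_stock" < pvGetA p "quantity"))

theorem A_eq_filter (products : List (List (String × Int))) (status : String) :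
    filter_products_by_status products status = products.filter (predA status) := by
  unfold filter_products_by_status
  rw [show (fun (filtered : List (List (String × Int))) (product : List (String × Int)) =>
      let quantity := pvGetA product "quantity"
      let min_stock := pvGetA product "min_stock"
      if status == "Sem Estoque" && quantity == 0 then filtered ++ [product]
      else if status == "Estoque Baixo" && (decide (0 < quantity) && decide (quantity ≤ min_stock)) then filtered ++ [product]
      else if status == "Normal" && decide (min_stock < quantity) then filtered ++ [product]
      else filtered) =
    (fun filtered product => if predA status product = true then filtered ++ [product] else filtered) from by
      funext filtered product
      simp only [predA]
      split_ifs with h1 h2 h3 h4 h5 h6 h7 <;> simp_all <;>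
        (try rcases h7 with (⟨e, hq⟩ | ⟨e, hq⟩) | ⟨e, hq⟩ <;> subst e <;> simp_all <;> omega)]
  rw [PySem.List.foldl_append_if_eq_filter]
  rw [List.nil_append]

-- the bucket-building fold, seen through getD: each bucket is a filter of the processed prefix
theorem bucket_getD (l : List (List (String × Int)))
    (d : PySem.Dict String (List (List (String × Int)))) (k : String) :
    (l.foldl (fun b product =>
      match pvStockStatus product with
      | some category => b.modify category [] (· ++ [product])
      | none => b) d).getD k []
    = d.getD k [] ++ l.filter (fun p => pvStockStatus p == some k) := by
  induction l generalizing d with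
  | nil => simp
  | cons p l ih =>
    simp only [List.foldl_cons, List.filter_cons]
    cases hc : pvStockStatus p with
    | none => simp [ih]
    | some c =>
      rw [ih]
      by_cases hk : k = c
      · subst hk
        simp
      · simp [PySem.Dict.getD_modify, hk, (by simpa [eq_comm] using hk : ¬ c = k)]

theorem B_eq_filter (products : List (List (String × Int))) (status : String) :
    filter_products_by_status_alt products status
      = products.filter (fun p => pvStockStatus p == some status) := by
  unfold filter_products_by_status_alt
  rw [bucket_getD]
  simp

-- strict countP comparison for the tightness proof
theorem countP_strict {α : Type} (l : List α) (p q : α → Bool)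
    (h : ∀ x ∈ l, p x = true → q x = true)
    (x : α) (hx : x ∈ l) (hq : q x = true) (hp : p x = false) :
    l.countP p < l.countP q := by
  induction l with
  | nil => cases hx
  | cons y l ih =>
    have hmono : l.countP p ≤ l.countP q :=
      List.countP_mono_left (fun z hz => h z (List.mem_cons_of_mem y hz))
    rcases List.mem_cons.mp hx with rfl | hx'
    · simp only [List.countP_cons, hq, hp]
      simp only [Bool.false_eq_true, if_false, if_true]
      omega
    · have hlt := ih (fun z hz => h z (List.mem_cons_of_mem y hz)) hx'
      simp only [List.countP_cons]
      by_cases hy : p y = true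
      · have := h y List.mem_cons_self hy
        simp [hy, this]; omega
      · simp only [Bool.not_eq_true] at hy
        simp only [hy, Bool.false_eq_true, if_false]
        split_ifs <;> omega

-- pointwise comparison of the two predicates
theorem pred_iff (status : String) (p : List (String × Int)) :
    (pvStockStatus p == some status) = true →
    predA status p = true := by
  unfold pvStockStatus predA
  simp only [pvGetB_eq_pvGetA]
  split_ifs with h1 h2 h3 <;> intro h <;> simp_all <;> omega

theorem pred_eq_of_not_bad (status : String) (p : List (String × Int))
    (hnb : ¬ (status = "Normal" ∧ pvGetA p "quantity" = 0 ∧ pvGetA p "min_stock" < 0)) :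
    (pvStockStatus p == some status) = predA status p := by
  unfold pvStockStatus predA
  simp only [pvGetB_eq_pvGetA]
  by_cases hs1 : status = "Sem Estoque"
  · subst hs1; split_ifs with h1 h2 h3 <;> simp_all <;> omega
  · by_cases hs2 : status = "Estoque Baixo"
    · subst hs2; split_ifs with h1 h2 h3 <;> simp_all <;> omega
    · by_cases hs3 : status = "Normal"
      · subst hs3
        split_ifs with h1 h2 h3 <;> simp_all <;> omega
      · have e1 : ("Sem Estoque" == status) = false := beq_eq_false_iff_ne.mpr (Ne.symm hs1)
        have e1' : (status == "Sem Estoque") = false := beq_eq_false_iff_ne.mpr hs1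
        have e2 : ("Estoque Baixo" == status) = false := beq_eq_false_iff_ne.mpr (Ne.symm hs2)
        have e2' : (status == "Estoque Baixo") = false := beq_eq_false_iff_ne.mpr hs2
        have e3 : ("Normal" == status) = false := beq_eq_false_iff_ne.mpr (Ne.symm hs3)
        have e3' : (status == "Normal") = false := beq_eq_false_iff_ne.mpr hs3
        split_ifs with h1 h2 h3 <;> simp [e1, e1', e2, e2', e3, e3']

-- ===== VERDICT (by name: the statements are the Claim_ definitions above) =====
theorem filter_products_by_status_spec : Claim_unchanged_filter_products_by_status := by
  intro products status _ hnd
  rw [A_eq_filter, B_eq_filter]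
  unfold D_filter_products_by_status at hnd
  push_neg at hnd
  refine (List.filter_congr (fun p hp => ?_)).symm
  apply pred_eq_of_not_bad
  rintro ⟨hs, hq, hm⟩
  have h := hnd hs p hp
  rw [pvLookup0_eq_pvGetA, pvLookup0_eq_pvGetA] at h
  have h2 := h hq
  omega

theorem filter_products_by_status_changed : Claim_changed_filter_products_by_status := by
  unfold Claim_changed_filter_products_by_status; decide

theorem filter_products_by_status_tight : Claim_exact_filter_products_by_status := by
  intro products status _ hd
  obtain ⟨hs, p, hp, hq, hm⟩ := hd
  subst hs
  rw [pvLookup0_eq_pvGetA] at hq hm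
  rw [A_eq_filter, B_eq_filter]
  intro heq
  have hlen : (products.filter (predA "Normal")).length
      = (products.filter (fun p => pvStockStatus p == some "Normal")).length := by
    rw [heq]
  rw [← List.countP_eq_length_filter, ← List.countP_eq_length_filter] at hlen
  have hlt : products.countP (fun p => pvStockStatus p == some "Normal")
      < products.countP (predA "Normal") := by
    apply countP_strict products _ _ (fun z _ hz => pred_iff "Normal" z hz) p hp
    · unfold predA
      simp_all
      omega
    · unfold pvStockStatus
      simp [pvGetB_eq_pvGetA, hq]
  omega
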